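-- pv_equiv track=rewrite | github.com/firfircelik/sage-agent | src/rlm/advanced_optimizer.py | _merge_context_smart
-- ===== SOURCE A (Python) =====
-- from typing import Dict, List, Any, Optional, Tuple
--
-- def _merge_context_smart(prompt: str, context: str) -> Tuple[str, str]:
--     """Intelligently merge context with prompt."""
--     # Extract key information from context
--     context_lines = context.split('\n')
--
--     # Prioritize context by relevance
--     prompt_words = set(prompt.lower().split())
--     scored_lines = []
--
--     for line in context_lines:
--         if not line.strip():
--             continue
--
--         line_words = set(line.lower().split())
--         relevance = len(prompt_words & line_words)
--
--         if relevance > 0: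
--             scored_lines.append((relevance, line))
--
--     # Sort by relevance and take top items
--     scored_lines.sort(key=lambda x: x[0], reverse=True)
--     relevant_context = '\n'.join([line for _, line in scored_lines[:3]])
--
--     return prompt, relevant_context
-- ===== SOURCE B (Python) =====
-- def _merge_context_smart(prompt: str, context: str):
--     """Streaming top-3 selection: one pass keeps a bounded (size <= 3) buffer of
--     the best (relevance, line) pairs in stable descending order; no sort and no
--     full scored list are ever built."""
--     prompt_words = set(prompt.lower().split())
--
--     top = []  # at most 3 pairs, descending relevance, ties in encounter order
--     for line in context.split('\n'):
--         if not line.strip():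
--             continue
--         r = len(prompt_words & set(line.lower().split()))
--         if r <= 0:
--             continue
--         i = 0
--         while i < len(top) and top[i][0] >= r:
--             i += 1
--         top.insert(i, (r, line))
--         del top[3:]
--
--     return prompt, '\n'.join(l for _, l in top)
-- ===== Notes on version B (the rewrite author's own statement) =====
-- stated objective: alternative
-- what changed: B never sorts or stores the scored list: it streams over the lines keeping only a bounded buffer of at most 3 (relevance, line) pairs, inserting each kept line after equal-or-higher scores and truncating to 3, which reproduces the stable descending top-3 in one pass with O(1) extra space.
import Mathlib
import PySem

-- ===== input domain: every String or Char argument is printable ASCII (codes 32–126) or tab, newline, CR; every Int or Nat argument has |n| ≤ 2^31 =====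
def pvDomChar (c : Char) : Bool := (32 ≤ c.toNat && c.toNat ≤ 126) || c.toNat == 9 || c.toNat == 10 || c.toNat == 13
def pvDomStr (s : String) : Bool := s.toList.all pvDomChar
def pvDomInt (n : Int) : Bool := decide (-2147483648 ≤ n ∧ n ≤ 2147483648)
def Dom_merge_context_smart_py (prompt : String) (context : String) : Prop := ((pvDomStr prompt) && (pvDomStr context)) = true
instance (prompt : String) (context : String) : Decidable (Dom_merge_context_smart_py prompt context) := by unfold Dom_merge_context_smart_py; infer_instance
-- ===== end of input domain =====

-- B replaces A's stable descending sort of the full scored list by a one-pass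
-- streaming top-3 selection with a bounded buffer (objective: alternative).

-- set(s.lower().split()) — used verbatim by both Pythons
def pvWords (s : String) : PySem.Set String :=
  PySem.Set.ofList (PySem.Str.split₀ (PySem.Str.lower s))

-- ===== PORT A =====
def merge_context_smart_py (prompt : String) (context : String) : String × String :=
  -- context.split('\n'): sep "\n" ≠ "", so split? is always `some` (exact)
  let context_lines := (PySem.Str.split? context "\n").getD []
  let prompt_words := pvWords prompt
  let scored_lines : List (Int × String) := context_lines.foldl (fun acc line =>
      if PySem.Str.strip line = "" then acc
      else
        let line_words := pvWords line
        let relevance := PySem.Set.len (PySem.Set.inter prompt_words line_words)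
        if relevance > 0 then acc ++ [(relevance, line)] else acc) []
  let sorted_lines := PySem.List.sorted scored_lines (fun x => x.1) true
  let relevant_context :=
    PySem.Str.join "\n" ((PySem.List.slice sorted_lines none (some 3)).map (fun x => x.2))
  (prompt, relevant_context)

-- ===== PORT B =====
-- Source B's while loop: walk past entries with score ≥ r, insert (r, line) there
def pvInsTop (p : Int × String) : List (Int × String) → List (Int × String)
  | [] => [p]
  | q :: t => if q.1 ≥ p.1 then q :: pvInsTop p t else p :: q :: t

def merge_context_smart_py_alt (prompt : String) (context : String) : String × String :=
  let prompt_words := pvWords prompt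
  let top := ((PySem.Str.split? context "\n").getD []).foldl (fun top line =>
      if PySem.Str.strip line = "" then top
      else
        let r := PySem.Set.len (PySem.Set.inter prompt_words (pvWords line))
        if r ≤ 0 then top
        -- top.insert(i, (r, line)); del top[3:]
        else (pvInsTop (r, line) top).take 3) []
  (prompt, PySem.Str.join "\n" (top.map (fun p => p.2)))

-- ===== PRECONDITION & SPEC =====
def Spec_merge_context_smart_py (prompt : String) (context : String) (out : String × String) : Prop := out = merge_context_smart_py_alt prompt context
instance (prompt : String) (context : String) (out : String × String) : Decidable (Spec_merge_context_smart_py prompt context out) := by unfold Spec_merge_context_smart_py; infer_instance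

-- ===== CLAIM (what is proved, stated in full; the proofs are below) =====
def Claim_equal_merge_context_smart_py : Prop := ∀ (prompt : String) (context : String), Dom_merge_context_smart_py prompt context → Spec_merge_context_smart_py prompt context (merge_context_smart_py prompt context)

-- ===== LEMMAS AND PROOFS =====

-- the relevance score of a line
def pvSc (pw : PySem.Set String) (line : String) : Int :=
  PySem.Set.len (PySem.Set.inter pw (pvWords line))

-- the lines both loops keep
def pvGood (pw : PySem.Set String) (line : String) : Bool :=
  !(PySem.Str.strip line == "") && decide (pvSc pw line > 0)

-- A's scored_lines list
def pvPairs (pw : PySem.Set String) (lines : List String) : List (Int × String) :=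
  (lines.filter (pvGood pw)).map (fun l => (pvSc pw l, l))

-- Source B's insert is exactly the stable-descending-sort insertion step
theorem pvInsTop_eq_insertBy (p : Int × String) (l : List (Int × String)) :
    pvInsTop p l = PySem.List.insertBy (fun a b => decide (b.1 < a.1)) p l := by
  induction l with
  | nil => rfl
  | cons q t ih =>
    by_cases h : q.1 ≥ p.1
    · have hb : (decide (q.1 < p.1)) = false := by simp; omega
      simp [pvInsTop, PySem.List.insertBy, h, hb, ih]
    · have hb : (decide (q.1 < p.1)) = true := by simp; omega
      simp [pvInsTop, PySem.List.insertBy, h, hb]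

-- truncating before or after an insertion makes no difference to the first k
theorem take_insertBy {α : Type} (before : α → α → Bool) (x : α) :
    ∀ (l : List α) (k : Nat),
      (PySem.List.insertBy before x l).take k =
        (PySem.List.insertBy before x (l.take k)).take k := by
  intro l
  induction l with
  | nil => intro k; simp
  | cons y t ih =>
    intro k
    cases k with
    | zero => simp
    | succ n =>
      by_cases h : before x y = true
      · simp only [PySem.List.insertBy, h, if_true, List.take_succ_cons]
        cases n with
        | zero => simp
        | succ m =>
          simp only [List.take_succ_cons, List.take_take]
          rw [Nat.min_eq_left (by omega)]
      · simp only [Bool.not_eq_true] at h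
        simp only [PySem.List.insertBy, h, Bool.false_eq_true, if_false,
          List.take_succ_cons]
        rw [ih n]

-- A's loop produces exactly the good lines paired with their scores
theorem afold_eq_pvPairs (pw : PySem.Set String) (lines : List String)
    (acc : List (Int × String)) :
    lines.foldl (fun acc line =>
      if PySem.Str.strip line = "" then acc
      else
        let line_words := pvWords line
        let relevance := PySem.Set.len (PySem.Set.inter pw line_words)
        if relevance > 0 then acc ++ [(relevance, line)] else acc) acc =
    acc ++ pvPairs pw lines := by
  induction lines generalizing acc with
  | nil => simp [pvPairs]
  | cons l t ih =>
    simp only [List.foldl_cons]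
    by_cases h1 : PySem.Str.strip l = ""
    · rw [if_pos h1, ih]
      have hg : pvGood pw l = false := by simp [pvGood, h1]
      simp [pvPairs, hg]
    · rw [if_neg h1]
      by_cases h2 : PySem.Set.len (PySem.Set.inter pw (pvWords l)) > 0
      · simp only [if_pos h2, ih]
        have hg : pvGood pw l = true := by
          simp only [pvGood, pvSc, Bool.and_eq_true, Bool.not_eq_true',
            beq_eq_false_iff_ne, ne_eq, decide_eq_true_eq]
          exact ⟨h1, h2⟩
        simp [pvPairs, pvSc, hg]
      · simp only [if_neg h2, ih]
        have hd : decide (pvSc pw l > 0) = false :=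
          decide_eq_false (by simpa [pvSc] using h2)
        have hg : pvGood pw l = false := by simp [pvGood, hd]
        simp [pvPairs, hg]

-- B's loop is the bounded-insert fold over the very same pairs
theorem bfold_eq_pairs_fold (pw : PySem.Set String) (lines : List String)
    (s : List (Int × String)) :
    lines.foldl (fun top line =>
      if PySem.Str.strip line = "" then top
      else
        let r := PySem.Set.len (PySem.Set.inter pw (pvWords line))
        if r ≤ 0 then top else (pvInsTop (r, line) top).take 3) s =
    (pvPairs pw lines).foldl (fun top p => (pvInsTop p top).take 3) s := by
  induction lines generalizing s with
  | nil => simp [pvPairs]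
  | cons l t ih =>
    simp only [List.foldl_cons]
    by_cases h1 : PySem.Str.strip l = ""
    · rw [if_pos h1, ih]
      have hg : pvGood pw l = false := by simp [pvGood, h1]
      simp [pvPairs, hg]
    · rw [if_neg h1]
      by_cases h2 : PySem.Set.len (PySem.Set.inter pw (pvWords l)) ≤ 0
      · simp only [if_pos h2, ih]
        have hd : decide (pvSc pw l > 0) = false :=
          decide_eq_false (by simp [pvSc, not_lt]; simpa using h2)
        have hg : pvGood pw l = false := by simp [pvGood, hd]
        simp [pvPairs, hg]
      · simp only [if_neg h2, ih]
        have hg : pvGood pw l = true := by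
          simp only [pvGood, pvSc, Bool.and_eq_true, Bool.not_eq_true',
            beq_eq_false_iff_ne, ne_eq, decide_eq_true_eq]
          exact ⟨h1, not_le.mp h2⟩
        simp [pvPairs, pvSc, hg]

-- starts that agree on their first 3 entries keep agreeing after any fold of inserts
theorem foldl_insertBy_take_congr (L : List (Int × String)) :
    ∀ (s1 s2 : List (Int × String)), s1.take 3 = s2.take 3 →
      (L.foldl (fun acc x =>
        PySem.List.insertBy (fun a b => decide (b.1 < a.1)) x acc) s1).take 3 =
      (L.foldl (fun acc x =>
        PySem.List.insertBy (fun a b => decide (b.1 < a.1)) x acc) s2).take 3 := by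
  induction L with
  | nil => intro s1 s2 h; simpa using h
  | cons x t ih =>
    intro s1 s2 h
    simp only [List.foldl_cons]
    refine ih _ _ ?_
    rw [take_insertBy _ x s1 3, take_insertBy _ x s2 3, h]

-- the bounded-buffer fold computes take 3 of the full insertion-sort fold
theorem bounded_fold_eq_take (L : List (Int × String)) :
    ∀ (s : List (Int × String)), s = s.take 3 →
      L.foldl (fun top p => (pvInsTop p top).take 3) s =
        (L.foldl (fun acc x =>
          PySem.List.insertBy (fun a b => decide (b.1 < a.1)) x acc) s).take 3 := by
  induction L with
  | nil => intro s hs; simpa using hs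
  | cons x t ih =>
    intro s hs
    simp only [List.foldl_cons]
    rw [pvInsTop_eq_insertBy, ih _ (by simp [List.take_take])]
    exact foldl_insertBy_take_congr t _ _ (by simp [List.take_take])

-- ===== VERDICT (by name: the statement is the Claim_ definition above) =====
theorem merge_context_smart_py_spec : Claim_equal_merge_context_smart_py := by
  intro prompt context _
  show merge_context_smart_py prompt context = merge_context_smart_py_alt prompt context
  unfold merge_context_smart_py merge_context_smart_py_alt
  simp only []
  set pw := pvWords prompt with hpw
  set lines := (PySem.Str.split? context "\n").getD [] with hlines
  rw [afold_eq_pvPairs pw lines [], bfold_eq_pairs_fold pw lines [],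
    bounded_fold_eq_take (pvPairs pw lines) [] rfl, List.nil_append]
  set L := pvPairs pw lines with hL
  rw [← PySem.List.sorted_rev_eq_foldl_insertBy L (fun x => x.1),
    PySem.List.slice_to _ (by norm_num)]
  simp
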